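-- pv_equiv track=rewrite | github.com/kengiroy2-g/kenobase | scripts/analyze_pool_misses_deep.py | get_gap_pattern
-- ===== SOURCE A (Python) =====
-- from typing import Dict, List, Set, Tuple
--
-- def get_gap_pattern(draws: List[Dict], number: int) -> List[int]:
--     """Liste der Luecken zwischen Erscheinungen."""
--     gaps = []
--     last_seen = None
--     for i, draw in enumerate(draws[-60:]):
--         if number in draw["zahlen"]:
--             if last_seen is not None:
--                 gaps.append(i - last_seen)
--             last_seen = i
--     return gaps
-- ===== SOURCE B (Python) =====
-- def get_gap_pattern(draws, number):
--     """Liste der Luecken zwischen Erscheinungen."""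
--     def next_hit(rest):
--         for k, d in enumerate(rest):
--             if number in d["zahlen"]:
--                 return k
--         return None
--
--     def gaps_after(rest):
--         # rest starts right after an appearance; each gap is a relative offset
--         k = next_hit(rest)
--         if k is None:
--             return []
--         return [k + 1] + gaps_after(rest[k + 1:])
--
--     window = draws[-60:]
--     k = next_hit(window)
--     return [] if k is None else gaps_after(window[k + 1:])
-- ===== Notes on version B (the rewrite author's own statement) =====
-- stated objective: alternative
-- what changed: Replaces the fused enumerate-scan with a last_seen accumulator of absolute indices by a recursive search-and-slice algorithm: repeatedly find the offset of the next appearance in the remaining suffix, emit it as a relative gap (k+1), and recurse on the suffix after it; absolute positions are never formed.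
import Mathlib
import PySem

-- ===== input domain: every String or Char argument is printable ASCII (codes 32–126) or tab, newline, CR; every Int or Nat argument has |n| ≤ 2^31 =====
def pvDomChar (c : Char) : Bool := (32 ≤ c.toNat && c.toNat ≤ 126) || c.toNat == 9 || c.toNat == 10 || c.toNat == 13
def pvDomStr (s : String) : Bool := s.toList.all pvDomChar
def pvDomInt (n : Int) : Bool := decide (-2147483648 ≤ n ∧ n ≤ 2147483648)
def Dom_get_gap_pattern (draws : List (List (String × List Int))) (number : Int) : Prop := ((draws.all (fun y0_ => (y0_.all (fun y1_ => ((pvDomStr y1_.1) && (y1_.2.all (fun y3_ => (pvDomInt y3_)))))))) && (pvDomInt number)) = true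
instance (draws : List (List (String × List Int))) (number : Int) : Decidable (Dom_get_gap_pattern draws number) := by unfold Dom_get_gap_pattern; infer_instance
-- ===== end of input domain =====

-- B replaces A's fused enumerate-scan with a last_seen accumulator by a recursive
-- search-and-slice algorithm emitting relative gaps (alternative decomposition, same cost).

-- ===== PORT A =====
-- draw["zahlen"] raises KeyError when the key is missing; Pre_ excludes that, so getD [] is only a totaliser.
def get_gap_pattern (draws : List (List (String × List Int))) (number : Int) : List Int :=
  (((PySem.List.enumerate (PySem.List.slice draws (some (-60)) none) 0).foldl
    (fun (st : List Int × Option Int) p =>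
      if number ∈ ((PySem.Dict.mk p.2).get? "zahlen").getD [] then
        match st.2 with
        | some ls => (st.1 ++ [p.1 - ls], some p.1)
        | none => (st.1, some p.1)
      else st)
    ([], none))).1

-- ===== PORT B =====
-- next_hit(rest): offset of the first draw containing number, or None
def pvNextHit (number : Int) (rest : List (List (String × List Int))) : Option Nat :=
  rest.findIdx? (fun d => number ∈ ((PySem.Dict.mk d).get? "zahlen").getD [])

-- gaps_after(rest): recursion on the suffix after an appearance, emitting a relative gap k+1
def pvGapsAfter (number : Int) (rest : List (List (String × List Int))) : List Int :=
  match h : pvNextHit number rest with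
  | none => []
  | some k => ((k : Int) + 1) :: pvGapsAfter number (rest.drop (k + 1))
termination_by rest.length
decreasing_by
  have hk : k < rest.length := List.findIdx?_eq_some_iff_findIdx_eq.mp h |>.1
  simp [List.length_drop]; omega

def get_gap_pattern_alt (draws : List (List (String × List Int))) (number : Int) : List Int :=
  let window := PySem.List.slice draws (some (-60)) none
  match pvNextHit number window with
  | none => []
  | some k => pvGapsAfter number (window.drop (k + 1))

-- ===== PRECONDITION & SPEC =====
-- Pre_ excludes exactly the inputs on which Python A raises KeyError (B raises there too): a
-- draw inside the last-60 window that lacks the key "zahlen".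
def Pre_get_gap_pattern (draws : List (List (String × List Int))) (number : Int) : Prop :=
  ∀ d ∈ PySem.List.slice draws (some (-60)) none, ((PySem.Dict.mk d).get? "zahlen").isSome
instance (draws : List (List (String × List Int))) (number : Int) : Decidable (Pre_get_gap_pattern draws number) := by unfold Pre_get_gap_pattern; infer_instance

def pvWitness_get_gap_pattern : (List (List (String × List Int))) × Int :=
  ([[("zahlen", [1, 2])], [("zahlen", [3])], [("zahlen", [1])]], 1)

def Spec_get_gap_pattern (draws : List (List (String × List Int))) (number : Int) (out : List Int) : Prop := out = get_gap_pattern_alt draws number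
instance (draws : List (List (String × List Int))) (number : Int) (out : List Int) : Decidable (Spec_get_gap_pattern draws number out) := by unfold Spec_get_gap_pattern; infer_instance

-- ===== CLAIM (what is proved, stated in full; the proofs are below) =====
def Claim_equal_get_gap_pattern : Prop := ∀ (draws : List (List (String × List Int))) (number : Int), Dom_get_gap_pattern draws number → Pre_get_gap_pattern draws number → Spec_get_gap_pattern draws number (get_gap_pattern draws number)

-- ===== LEMMAS AND PROOFS =====

-- absolute positions of appearances, enumerated from s (A's view of the window)
def pvPositions (number : Int) (l : List (List (String × List Int))) (s : Int) : List Int :=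
  (PySem.List.enumerate l s).filterMap
    (fun p => if number ∈ ((PySem.Dict.mk p.2).get? "zahlen").getD [] then some p.1 else none)

-- consecutive pairwise differences of a position list
def pvDiffs (xs : List Int) : List Int := List.zipWith (fun a b => b - a) xs xs.tail

-- add c to the first gap only
def pvBump (c : Int) : List Int → List Int
  | [] => []
  | g :: gs => (g + c) :: gs

theorem pvDiffs_cons_cons (x y : Int) (t : List Int) :
    pvDiffs (x :: y :: t) = (y - x) :: pvDiffs (y :: t) := rfl

-- A's fold, from any accumulator, appends the pairwise differences of last_seen ++ positions
theorem pvFold_eq (number : Int) :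
    ∀ (l : List (List (String × List Int))) (s : Int) (gaps : List Int) (ls : Option Int),
    ((PySem.List.enumerate l s).foldl
      (fun (st : List Int × Option Int) p =>
        if number ∈ ((PySem.Dict.mk p.2).get? "zahlen").getD [] then
          match st.2 with
          | some j => (st.1 ++ [p.1 - j], some p.1)
          | none => (st.1, some p.1)
        else st)
      (gaps, ls)).1
    = gaps ++ pvDiffs (ls.toList ++ pvPositions number l s) := by
  intro l
  induction l with
  | nil =>
    intro s gaps ls
    cases ls <;> simp [PySem.List.enumerate_nil, pvPositions, pvDiffs]
  | cons d rest ih =>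
    intro s gaps ls
    rw [PySem.List.enumerate_cons]
    unfold pvPositions
    rw [PySem.List.enumerate_cons]
    by_cases h : number ∈ ((PySem.Dict.mk d).get? "zahlen").getD []
    · cases ls with
      | none =>
        simp only [List.foldl_cons, List.filterMap_cons, if_pos h]
        rw [ih]
        simp [pvPositions]
      | some j =>
        simp only [List.foldl_cons, List.filterMap_cons, if_pos h]
        rw [ih]
        simp [pvPositions, pvDiffs_cons_cons]
    · simp only [List.foldl_cons, List.filterMap_cons, if_neg h]
      rw [ih]
      simp [pvPositions]

-- pvNextHit-directed unfoldings of pvGapsAfter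
theorem pvGapsAfter_none (number : Int) (l : List (List (String × List Int)))
    (h : pvNextHit number l = none) : pvGapsAfter number l = [] := by
  rw [pvGapsAfter]; split <;> simp_all

theorem pvGapsAfter_some (number : Int) (l : List (List (String × List Int))) (k : Nat)
    (h : pvNextHit number l = some k) :
    pvGapsAfter number l = ((k : Int) + 1) :: pvGapsAfter number (l.drop (k + 1)) := by
  rw [pvGapsAfter]; split <;> simp_all

-- positions of a cons, in terms of the membership test on the head
theorem pvPositions_cons (number : Int) (d : List (String × List Int))
    (rest : List (List (String × List Int))) (s : Int) :
    pvPositions number (d :: rest) s =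
      if number ∈ ((PySem.Dict.mk d).get? "zahlen").getD []
      then s :: pvPositions number rest (s + 1)
      else pvPositions number rest (s + 1) := by
  unfold pvPositions
  rw [PySem.List.enumerate_cons]
  by_cases h : number ∈ ((PySem.Dict.mk d).get? "zahlen").getD [] <;>
    simp [h]

-- the unfolding of pvGapsAfter on a cons, via pvBump
theorem pvGapsAfter_cons (number : Int) (d : List (String × List Int))
    (rest : List (List (String × List Int))) :
    pvGapsAfter number (d :: rest) =
      if number ∈ ((PySem.Dict.mk d).get? "zahlen").getD []
      then 1 :: pvGapsAfter number rest
      else pvBump 1 (pvGapsAfter number rest) := by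
  by_cases h : number ∈ ((PySem.Dict.mk d).get? "zahlen").getD []
  · rw [if_pos h]
    have hf : pvNextHit number (d :: rest) = some 0 := by
      simp [pvNextHit, List.findIdx?_cons, h]
    rw [pvGapsAfter_some number _ 0 hf]
    simp
  · rw [if_neg h]
    have hf : pvNextHit number (d :: rest) = (pvNextHit number rest).map (· + 1) := by
      simp [pvNextHit, List.findIdx?_cons, h]
    cases hr : pvNextHit number rest with
    | none =>
      rw [hr] at hf
      rw [pvGapsAfter_none number _ hf, pvGapsAfter_none number _ hr]
      rfl
    | some k =>
      rw [hr] at hf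
      rw [pvGapsAfter_some number _ (k + 1) (by simpa using hf),
          pvGapsAfter_some number _ k hr]
      simp [pvBump, List.drop_succ_cons]

-- gaps measured from a last appearance at j, with the suffix enumerated from s:
-- the pairwise differences of j :: positions equal the relative gaps, head shifted by s - j - 1
theorem pvDiffs_cons_positions (number : Int) :
    ∀ (l : List (List (String × List Int))) (s j : Int),
    pvDiffs (j :: pvPositions number l s) = pvBump (s - j - 1) (pvGapsAfter number l) := by
  intro l
  induction l with
  | nil =>
    intro s j
    rw [pvGapsAfter_none number _ (by simp [pvNextHit])]
    simp [pvPositions, PySem.List.enumerate_nil, pvDiffs, pvBump]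
  | cons d rest ih =>
    intro s j
    rw [pvGapsAfter_cons, pvPositions_cons]
    by_cases h : number ∈ ((PySem.Dict.mk d).get? "zahlen").getD []
    · rw [if_pos h, if_pos h, pvDiffs_cons_cons, ih (s + 1) s]
      cases hg : pvGapsAfter number rest with
      | nil => simp [pvBump]
      | cons g gs => simp [pvBump]
    · rw [if_neg h, if_neg h, ih (s + 1) j]
      cases hg : pvGapsAfter number rest with
      | nil => simp [pvBump]
      | cons g gs => simp [pvBump]; ring

-- top level: pairwise differences of all positions = B's search-and-slice result
theorem pvDiffs_positions (number : Int) :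
    ∀ (l : List (List (String × List Int))) (s : Int),
    pvDiffs (pvPositions number l s) =
      (match pvNextHit number l with
       | none => []
       | some k => pvGapsAfter number (l.drop (k + 1))) := by
  intro l
  induction l with
  | nil => intro s; simp [pvPositions, PySem.List.enumerate_nil, pvDiffs, pvNextHit]
  | cons d rest ih =>
    intro s
    rw [pvPositions_cons]
    by_cases h : number ∈ ((PySem.Dict.mk d).get? "zahlen").getD []
    · have hf : pvNextHit number (d :: rest) = some 0 := by
        simp [pvNextHit, List.findIdx?_cons, h]
      rw [if_pos h, hf]
      have := pvDiffs_cons_positions number rest (s + 1) s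
      rw [this]
      simp only [List.drop_succ_cons, List.drop_zero]
      cases hg : pvGapsAfter number rest with
      | nil => simp [pvBump]
      | cons g gs => simp [pvBump]
    · have hf : pvNextHit number (d :: rest) = (pvNextHit number rest).map (· + 1) := by
        simp [pvNextHit, List.findIdx?_cons, h]
      rw [if_neg h, ih (s + 1), hf]
      cases hr : pvNextHit number rest with
      | none => simp
      | some k => simp [List.drop_succ_cons]

-- ===== VERDICT (by name: the statement is the Claim_ definition above) =====
theorem get_gap_pattern_spec : Claim_equal_get_gap_pattern := by
  intro draws number _ _
  unfold Spec_get_gap_pattern get_gap_pattern get_gap_pattern_alt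
  rw [pvFold_eq]
  simp only [Option.toList_none, List.nil_append]
  rw [pvDiffs_positions]
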